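-- pv_equiv track=rewrite | github.com/Jefino9488/AI_Chatbot | Server/test.py | generateKeySquare
-- ===== SOURCE A (Python) =====
-- def generateKeySquare(key):
--     alphabet = "ABCDEFGHIKLMNOPQRSTUVWXYZ"
--     key = key.upper()
--     key = "".join(sorted(set(key), key=key.index))  # Remove duplicates while maintaining order
--     key_square = [c for c in key if c in alphabet]
--     for c in alphabet:
--         if c not in key_square:
--             key_square.append(c)
--     key_matrix = [key_square[i:i + 5] for i in range(0, 25, 5)]
--     return key_matrix
-- ===== SOURCE B (Python) =====
-- def generateKeySquare(key):
--     alphabet = "ABCDEFGHIKLMNOPQRSTUVWXYZ"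
--     k = key.upper()
--
--     def rank(c):
--         # letters in the key come first, by first occurrence; the rest follow in alphabet order
--         return k.index(c) if c in k else len(k) + alphabet.index(c)
--
--     square = sorted(alphabet, key=rank)
--     return [square[i:i + 5] for i in range(0, 25, 5)]
-- ===== Notes on version B (the rewrite author's own statement) =====
-- stated objective: alternative
-- what changed: Instead of A's pipeline (dedup the key preserving order, filter to the alphabet, append missing letters by scanning the growing list), B sorts the fixed 25-letter alphabet by a rank function (first-occurrence position in the upper-cased key, or len(key)+alphabet position for absent letters) and chunks the result; no dedup, no filtering and no append loop occur.
import Mathlib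
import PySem

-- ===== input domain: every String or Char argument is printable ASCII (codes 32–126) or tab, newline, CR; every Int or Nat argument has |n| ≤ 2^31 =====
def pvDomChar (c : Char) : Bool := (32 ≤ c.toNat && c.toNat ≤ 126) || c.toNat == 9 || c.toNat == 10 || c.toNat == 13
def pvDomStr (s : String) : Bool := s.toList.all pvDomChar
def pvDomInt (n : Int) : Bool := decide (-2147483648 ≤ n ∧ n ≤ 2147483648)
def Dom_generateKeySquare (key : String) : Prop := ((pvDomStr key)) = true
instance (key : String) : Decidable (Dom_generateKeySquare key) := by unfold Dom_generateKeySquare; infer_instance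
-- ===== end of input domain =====

-- B replaces A's dedup/filter/append pipeline with a single sort of the fixed alphabet by a rank function (alternative algorithm; return-value equivalence).
-- ===== PORT A =====
-- Python chars are 1-char strings; both ports carry List Char and render rows as 1-char Strings at the end.
def generateKeySquare (key : String) : List (List String) :=
  let alphabet : List Char := "ABCDEFGHIKLMNOPQRSTUVWXYZ".toList
  let ks : List Char := (PySem.Str.upper key).toList
  -- sorted(set(key), key=key.index); key.index(c) always succeeds for c in set(key), so getD 0 is never taken
  let dk : List Char := PySem.List.sorted (PySem.Set.ofList ks) (fun c => (PySem.List.index? ks c).getD 0) false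
  let keySquare : List Char := dk.filter (fun c => alphabet.contains c)
  let keySquare : List Char :=
    alphabet.foldl (fun sq c => if !(sq.contains c) then sq ++ [c] else sq) keySquare
  (PySem.List.pyRange 0 25 5).map
    (fun i => (PySem.List.slice keySquare (some i) (some (i + 5))).map (fun c => String.ofList [c]))

-- ===== PORT B =====
-- rank(c) = k.index(c) if c in k else len(k) + alphabet.index(c); both str.index calls are
-- ported as PySem.Chars.find (exact: on this branch the needle is present, so index = find).
def pvRank (ks alphabet : List Char) (c : Char) : Int :=
  if PySem.Chars.isIn [c] ks then PySem.Chars.find ks [c]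
  else (ks.length : Int) + PySem.Chars.find alphabet [c]

def generateKeySquare_alt (key : String) : List (List String) :=
  let alphabet : List Char := "ABCDEFGHIKLMNOPQRSTUVWXYZ".toList
  let ks : List Char := (PySem.Str.upper key).toList
  let square : List Char := PySem.List.sorted alphabet (pvRank ks alphabet) false
  (PySem.List.pyRange 0 25 5).map
    (fun i => (PySem.List.slice square (some i) (some (i + 5))).map (fun c => String.ofList [c]))

-- ===== PRECONDITION & SPEC =====
def Spec_generateKeySquare (key : String) (out : List (List String)) : Prop := out = generateKeySquare_alt key
instance (key : String) (out : List (List String)) : Decidable (Spec_generateKeySquare key out) := by unfold Spec_generateKeySquare; infer_instance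

-- ===== CLAIM (what is proved, stated in full; the proofs are below) =====
def Claim_equal_generateKeySquare : Prop := ∀ (key : String), Dom_generateKeySquare key → Spec_generateKeySquare key (generateKeySquare key)

-- ===== LEMMAS AND PROOFS =====

-- index? of a member is an index into the list
lemma pv_index?_lt_length {xs : List Char} {v : Char} {k : Nat}
    (h : PySem.List.index? xs v = some k) : k < xs.length := by
  rcases (PySem.List.index?_eq_some_iff xs v k).1 h with ⟨pre, suf, hxs, hlen, -⟩
  subst hxs
  simp only [List.length_append, List.length_cons, ← hlen]
  omega

-- a singleton is a prefix of drop i exactly when the character sits at index i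
lemma pv_singleton_prefix_drop {l : List Char} {c : Char} {i : Nat} (h : i < l.length) :
    [c] <+: l.drop i ↔ l[i] = c := by
  rw [show l.drop i = l[i] :: l.drop (i+1) from (List.getElem_cons_drop h).symm,
     List.cons_prefix_cons]
  constructor
  · rintro ⟨h1, -⟩; exact h1.symm
  · intro h1; exact ⟨h1.symm, List.nil_prefix⟩

-- a present character is an infix as a singleton
lemma pv_singleton_infix {ks : List Char} {c : Char} (h : c ∈ ks) : [c] <:+: ks := by
  rcases List.mem_iff_append.1 h with ⟨pre, suf, rfl⟩
  exact ⟨pre, suf, by simp⟩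

-- str.find of a present single character is the first-occurrence index (= list index?)
lemma pv_find_singleton {ks : List Char} {c : Char} {m : Nat}
    (h : PySem.List.index? ks c = some m) : PySem.Chars.find ks [c] = (m : Int) := by
  have hmem : c ∈ ks := (PySem.List.index?_isSome_iff ks c).1 (Option.isSome_of_eq_some h)
  have hm := pv_index?_lt_length h
  rcases PySem.List.getElem_of_index?_eq_some h with ⟨hk, hget, hmin⟩
  have hinf : [c] <:+: ks := pv_singleton_infix hmem
  have hnon : 0 ≤ PySem.Chars.find ks [c] := (PySem.Chars.find_nonneg_iff ks [c]).2 hinf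
  rcases PySem.Chars.find_spec (s := ks) (sub := [c]) hnon with ⟨hpre, hfirst⟩
  set f := (PySem.Chars.find ks [c]).toNat with hf
  have hfl : f < ks.length := by
    by_contra hge
    push Not at hge
    have : ks.drop f = [] := List.drop_eq_nil_of_le hge
    rw [this] at hpre
    simp at hpre
  have hfc : ks[f] = c := (pv_singleton_prefix_drop hfl).1 hpre
  have h1 : ¬ m < f := fun hlt => (hfirst m hlt) ((pv_singleton_prefix_drop hm).2 hget)
  have h2 : ¬ f < m := fun hlt => (hmin f hlt) hfc
  have : f = m := by omega
  omega

lemma pv_isIn_singleton (ks : List Char) (c : Char) :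
    PySem.Chars.isIn [c] ks = true ↔ c ∈ ks := by
  rw [PySem.Chars.isIn_iff_infix]
  exact ⟨fun h => h.mem (by simp), pv_singleton_infix⟩

-- rank of a key letter is its first-occurrence index in the key
lemma pv_rank_mem {ks alphabet : List Char} {c : Char} (h : c ∈ ks) :
    pvRank ks alphabet c = (((PySem.List.index? ks c).getD 0 : Nat) : Int) := by
  rcases Option.isSome_iff_exists.1 ((PySem.List.index?_isSome_iff ks c).2 h) with ⟨m, hm⟩
  unfold pvRank
  rw [if_pos ((pv_isIn_singleton ks c).2 h), pv_find_singleton hm, hm]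
  rfl

-- rank of an absent letter is len(key) + its alphabet index
lemma pv_rank_not_mem {ks alphabet : List Char} {c : Char} (hc : c ∉ ks) (hal : c ∈ alphabet) :
    pvRank ks alphabet c = (ks.length : Int) + (((PySem.List.index? alphabet c).getD 0 : Nat) : Int) := by
  rcases Option.isSome_iff_exists.1 ((PySem.List.index?_isSome_iff alphabet c).2 hal) with ⟨m, hm⟩
  unfold pvRank
  rw [if_neg (fun h => hc ((pv_isIn_singleton ks c).1 h)), pv_find_singleton hm, hm]
  rfl

-- set(ks) lists first occurrences in order, so key.index is strictly increasing along it
lemma pv_pairwise_idx (ks : List Char) :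
    (PySem.Set.ofList ks).Pairwise
      (fun a b => (PySem.List.index? ks a).getD 0 < (PySem.List.index? ks b).getD 0) := by
  induction ks using List.reverseRecOn with
  | nil => simp [PySem.Set.ofList]
  | append_singleton xs x ih =>
    rw [PySem.Set.ofList_append_singleton]
    have hmem : ∀ a ∈ PySem.Set.ofList xs, a ∈ xs := fun a ha => (PySem.Set.mem_ofList xs a).1 ha
    have hkey : ∀ a ∈ PySem.Set.ofList xs,
        PySem.List.index? (xs ++ [x]) a = PySem.List.index? xs a := fun a ha =>
      PySem.List.index?_append_of_mem [x] (hmem a ha)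
    by_cases hx : x ∈ xs
    · have : PySem.Set.add (PySem.Set.ofList xs) x = PySem.Set.ofList xs := by
        simp [PySem.Set.add, PySem.Set.contains, hx]
      rw [this]
      refine ih.imp_of_mem ?_
      intro a b ha hb hab
      rw [hkey a ha, hkey b hb]; exact hab
    · have hadd : PySem.Set.add (PySem.Set.ofList xs) x = PySem.Set.ofList xs ++ [x] := by
        simp [PySem.Set.add, PySem.Set.contains, hx]
      rw [hadd, List.pairwise_append]
      refine ⟨?_, by simp, ?_⟩
      · refine ih.imp_of_mem ?_
        intro a b ha hb hab
        rw [hkey a ha, hkey b hb]; exact hab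
      · intro a ha b hb
        simp only [List.mem_singleton] at hb; subst hb
        rw [hkey a ha, PySem.List.index?_append_singleton_self _ _ hx]
        have hamem : a ∈ xs := hmem a ha
        rcases Option.isSome_iff_exists.1 ((PySem.List.index?_isSome_iff _ _).2 hamem) with ⟨k, hk⟩
        have hlt := pv_index?_lt_length hk
        rw [hk]
        simpa using hlt

-- sorted(set(ks), key=ks.index) is just ordered dedup
lemma pv_sorted_set (ks : List Char) :
    PySem.List.sorted (PySem.Set.ofList ks) (fun c => (PySem.List.index? ks c).getD 0) false
      = PySem.Set.ofList ks :=
  PySem.List.sorted_eq_of_perm_of_pairwise_lt _ _ _ (List.Perm.refl _) (pv_pairwise_idx ks)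

-- A's fill loop over a duplicate-free alphabet appends exactly the missing letters, in order
lemma pv_fill (al : List Char) (sq : List Char) (h : al.Nodup) :
    al.foldl (fun sq c => if !(sq.contains c) then sq ++ [c] else sq) sq
      = sq ++ al.filter (fun c => !(sq.contains c)) := by
  induction al generalizing sq with
  | nil => simp
  | cons c al ih =>
    have hc : c ∉ al := (List.nodup_cons.1 h).1
    have hal : al.Nodup := (List.nodup_cons.1 h).2
    simp only [List.foldl_cons, List.filter_cons]
    by_cases hm : c ∈ sq
    · have h1 : (!sq.contains c) = false := by simp [List.contains_eq_mem, hm]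
      rw [h1]
      simp only [Bool.false_eq_true, if_false]
      exact ih sq hal
    · have h1 : (!sq.contains c) = true := by simp [List.contains_eq_mem, hm]
      rw [h1]
      simp only [if_true]
      rw [ih (sq ++ [c]) hal]
      have heq : al.filter (fun x => !((sq ++ [c]).contains x)) = al.filter (fun x => !(sq.contains x)) := by
        apply List.filter_congr
        intro x hx
        have hxc : x ≠ c := fun hxc => hc (hxc ▸ hx)
        simp [List.contains_eq_mem, hxc]
      rw [heq]
      simp

-- The main list identity: A's key_square is the alphabet sorted by pvRank
lemma pv_square_eq (ks alphabet F : List Char)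
    (hal : alphabet = "ABCDEFGHIKLMNOPQRSTUVWXYZ".toList)
    (hF : F = (PySem.Set.ofList ks).filter (fun c => alphabet.contains c)) :
    F ++ alphabet.filter (fun c => !(F.contains c))
    = PySem.List.sorted alphabet (pvRank ks alphabet) false := by
  have halnd : alphabet.Nodup := by rw [hal]; decide
  have hFnd : F.Nodup := hF ▸ (PySem.Set.nodup_ofList ks).filter _
  have hFal : ∀ c ∈ F, c ∈ alphabet := by
    intro c hcF
    have := (List.mem_filter.1 (hF ▸ hcF)).2
    simpa [List.contains_eq_mem] using this
  have hFks : ∀ c ∈ F, c ∈ ks := fun c hcF =>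
    (PySem.Set.mem_ofList ks c).1 (List.mem_filter.1 (hF ▸ hcF)).1
  -- the second part: alphabet letters not in F are not in ks
  have hMks : ∀ c ∈ alphabet.filter (fun c => !(F.contains c)), c ∉ ks := by
    intro c hcM hks
    rcases List.mem_filter.1 hcM with ⟨hcal, hnF⟩
    have hcF : c ∈ F := hF ▸ List.mem_filter.2 ⟨(PySem.Set.mem_ofList ks c).2 hks,
      by simpa [List.contains_eq_mem] using hcal⟩
    simp [List.contains_eq_mem, hcF] at hnF
  -- permutation with the alphabet
  have hnodup : (F ++ alphabet.filter (fun c => !(F.contains c))).Nodup := by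
    refine List.Nodup.append hFnd (halnd.filter _) ?_
    intro a haF ham
    have := (List.mem_filter.1 ham).2
    simp [List.contains_eq_mem, haF] at this
  have hperm : (F ++ alphabet.filter (fun c => !(F.contains c))).Perm alphabet := by
    refine (List.perm_ext_iff_of_nodup hnodup halnd).2 ?_
    intro a
    constructor
    · intro h
      rcases List.mem_append.1 h with h | h
      · exact hFal a h
      · exact (List.mem_filter.1 h).1
    · intro h
      by_cases hF : a ∈ F
      · exact List.mem_append.2 (Or.inl hF)
      · exact List.mem_append.2 (Or.inr (List.mem_filter.2 ⟨h, by simp [List.contains_eq_mem, hF]⟩))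
  -- strict rank increase along the concatenation
  have hpw : (F ++ alphabet.filter (fun c => !(F.contains c))).Pairwise
      (fun a b => pvRank ks alphabet a < pvRank ks alphabet b) := by
    rw [List.pairwise_append]
    refine ⟨?_, ?_, ?_⟩
    · -- inside F: rank = first index in ks, strictly increasing (F is a sublist of set(ks))
      have hsub : F.Sublist (PySem.Set.ofList ks) := hF ▸ List.filter_sublist
      have := (pv_pairwise_idx ks).sublist hsub
      refine this.imp_of_mem ?_
      intro a b ha hb hab
      rw [pv_rank_mem (hFks a ha), pv_rank_mem (hFks b hb)]
      exact_mod_cast hab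
    · -- inside the missing part: rank = len ks + alphabet index, strictly increasing
      have hsub : (alphabet.filter (fun c => !(F.contains c))).Sublist alphabet := List.filter_sublist
      have hpwal : alphabet.Pairwise
          (fun a b => (PySem.List.index? alphabet a).getD 0 < (PySem.List.index? alphabet b).getD 0) := by
        have h0 : PySem.Set.ofList alphabet = alphabet := by rw [hal]; decide
        have := pv_pairwise_idx alphabet
        rwa [h0] at this
      refine (hpwal.sublist hsub).imp_of_mem ?_
      intro a b ha hb hab
      have hal_a := (List.mem_filter.1 ha).1
      have hal_b := (List.mem_filter.1 hb).1
      rw [pv_rank_not_mem (hMks a ha) hal_a, pv_rank_not_mem (hMks b hb) hal_b]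
      omega
    · -- across: every key letter ranks below every missing letter
      intro a haF b hbM
      rcases Option.isSome_iff_exists.1 ((PySem.List.index?_isSome_iff ks a).2 (hFks a haF)) with ⟨m, hm⟩
      have hmlt := pv_index?_lt_length hm
      rw [pv_rank_mem (hFks a haF), pv_rank_not_mem (hMks b hbM) (List.mem_filter.1 hbM).1, hm]
      have : (0:Int) ≤ (((PySem.List.index? alphabet b).getD 0 : Nat) : Int) := by positivity
      simp only [Option.getD_some]
      omega
  exact (PySem.List.sorted_eq_of_perm_of_pairwise_lt _ _ _ hperm hpw).symm

-- ===== VERDICT (by name: the statement is the Claim_ definition above) =====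
theorem generateKeySquare_spec : Claim_equal_generateKeySquare := by
  intro key _
  simp only [Spec_generateKeySquare, generateKeySquare, generateKeySquare_alt, pv_sorted_set]
  rw [pv_fill _ _ (by decide), pv_square_eq ((PySem.Str.upper key).toList) _ _ rfl rfl]
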